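-- pv_equiv track=rewrite | github.com/mld-0/hackerrank | 3-months-prep/07-05-climbing-the-leaderboard.py | climbingLeaderboard_LinearSearch
-- ===== SOURCE A (Python) =====
-- from typing import List
--
-- def climbingLeaderboard_LinearSearch(ranked: List[int], player: List[int]) -> List[int]:
--     result = []
--     ranked_unique = list(sorted(set(ranked), reverse=True))
--     for score in player:
--         index = 0
--         for i in range(len(ranked_unique)):
--             index += 1
--             if ranked_unique[i] <= score:
--                 break
--         if score < ranked_unique[-1]:
--             index += 1
--         result.append(index)
--     return result
-- ===== SOURCE B (Python) =====
-- from typing import List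
--
-- def climbingLeaderboard_LinearSearch(ranked: List[int], player: List[int]) -> List[int]:
--     asc = sorted(set(ranked))
--     n = len(asc)
--     result = []
--     for score in player:
--         # binary search: first position whose score is > `score` (bisect_right)
--         lo, hi = 0, n
--         while lo < hi:
--             mid = (lo + hi) // 2
--             if asc[mid] <= score:
--                 lo = mid + 1
--             else:
--                 hi = mid
--         result.append(n - lo + 1)
--     return result
-- ===== Notes on version B (the rewrite author's own statement) =====
-- stated objective: faster
-- what changed: replaces the per-player linear scan of the descending unique leaderboard by a hand-written binary search (bisect_right) into the ascending unique leaderboard, rank = n - pos + 1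
import Mathlib
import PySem

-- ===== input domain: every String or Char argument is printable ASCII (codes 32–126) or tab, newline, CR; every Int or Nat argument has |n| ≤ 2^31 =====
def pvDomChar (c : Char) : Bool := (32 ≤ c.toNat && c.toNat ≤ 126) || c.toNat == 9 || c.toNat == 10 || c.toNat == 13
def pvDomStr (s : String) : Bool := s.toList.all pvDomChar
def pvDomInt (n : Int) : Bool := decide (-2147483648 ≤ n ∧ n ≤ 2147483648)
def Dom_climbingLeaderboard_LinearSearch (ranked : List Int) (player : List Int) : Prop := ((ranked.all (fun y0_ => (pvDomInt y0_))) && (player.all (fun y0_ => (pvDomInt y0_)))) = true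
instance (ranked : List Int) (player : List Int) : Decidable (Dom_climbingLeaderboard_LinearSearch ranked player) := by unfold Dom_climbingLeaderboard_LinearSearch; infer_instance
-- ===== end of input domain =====

-- B replaces A's per-player linear scan of the descending unique leaderboard by a binary
-- search into the ascending unique leaderboard (objective: faster, asymptotic).

-- ===== PORT A =====
-- inner 'for i in range(len(ranked_unique)): index += 1; if ranked_unique[i] <= score: break'
def pvALoop (score : Int) : List Int → Int → Int
  | [], index => index
  | h :: t, index => if h ≤ score then index + 1 else pvALoop score t (index + 1)

def climbingLeaderboard_LinearSearch (ranked : List Int) (player : List Int) : List Int :=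
  let ranked_unique := PySem.List.sorted (PySem.Set.ofList ranked) (fun x => x) true
  player.foldl (fun result score =>
    let index := pvALoop score ranked_unique 0
    -- ranked_unique[-1]: IndexError when ranked = [] — excluded by Pre_; pyGetD exact there
    let index := if score < PySem.List.pyGetD ranked_unique (-1) 0 then index + 1 else index
    result ++ [index]) []

-- ===== PORT B =====
-- 'while lo < hi: mid = (lo+hi)//2; if asc[mid] <= score: lo = mid+1 else: hi = mid'
-- (asc[mid] is always in range, so getD is exact)
def pvBisect (asc : List Int) (score : Int) (lo hi : Nat) : Nat :=
  if _h : lo < hi then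
    let mid := (lo + hi) / 2
    if asc.getD mid 0 ≤ score then pvBisect asc score (mid + 1) hi
    else pvBisect asc score lo mid
  else lo
termination_by hi - lo
decreasing_by all_goals omega

def climbingLeaderboard_LinearSearch_alt (ranked : List Int) (player : List Int) : List Int :=
  let asc := PySem.List.sorted (PySem.Set.ofList ranked) (fun x => x) false
  let n := asc.length
  player.foldl (fun result score =>
    result ++ [(n : Int) - (pvBisect asc score 0 n : Int) + 1]) []

-- ===== PRECONDITION & SPEC =====
-- Pre_ excludes only the inputs on which A raises IndexError (empty ranked with a non-empty player).
def Pre_climbingLeaderboard_LinearSearch (ranked : List Int) (player : List Int) : Prop :=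
  ranked ≠ [] ∨ player = []
instance (ranked : List Int) (player : List Int) : Decidable (Pre_climbingLeaderboard_LinearSearch ranked player) := by unfold Pre_climbingLeaderboard_LinearSearch; infer_instance

def pvWitness_climbingLeaderboard_LinearSearch : List Int × List Int := ([100, 90, 90, 80], [70, 85, 105])

def Spec_climbingLeaderboard_LinearSearch (ranked : List Int) (player : List Int) (out : List Int) : Prop := out = climbingLeaderboard_LinearSearch_alt ranked player
instance (ranked : List Int) (player : List Int) (out : List Int) : Decidable (Spec_climbingLeaderboard_LinearSearch ranked player out) := by unfold Spec_climbingLeaderboard_LinearSearch; infer_instance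

-- ===== CLAIM (what is proved, stated in full; the proofs are below) =====
def Claim_equal_climbingLeaderboard_LinearSearch : Prop := ∀ (ranked : List Int) (player : List Int), Dom_climbingLeaderboard_LinearSearch ranked player → Pre_climbingLeaderboard_LinearSearch ranked player → Spec_climbingLeaderboard_LinearSearch ranked player (climbingLeaderboard_LinearSearch ranked player)

-- ===== LEMMAS AND PROOFS =====

theorem pv_foldl_app (f : Int → Int) : ∀ (xs : List Int) (acc : List Int),
    xs.foldl (fun r s => r ++ [f s]) acc = acc ++ xs.map f := by
  intro xs
  induction xs with
  | nil => simp
  | cons h t ih => intro acc; simp [List.foldl, ih]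

-- A's inner loop on a weakly descending list counts the elements > score (capped by length)
theorem pvALoop_eq (score : Int) : ∀ (l : List Int) (idx : Int),
    l.Pairwise (fun a b => b ≤ a) →
    pvALoop score l idx = idx + ((min (l.countP (fun a => decide (score < a)) + 1) l.length : Nat) : Int) := by
  intro l
  induction l with
  | nil => intro idx _; simp [pvALoop]
  | cons h t ih =>
    intro idx hp
    rw [List.pairwise_cons] at hp
    by_cases hle : h ≤ score
    · have hcz : t.countP (fun a => decide (score < a)) = 0 := by
        rw [List.countP_eq_zero]
        intro a ha
        have := hp.1 a ha
        simp only [decide_eq_true_eq]; omega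
      simp [pvALoop, hle, List.countP_cons, hcz, show ¬ score < h by omega]
    · have hlt : score < h := by omega
      have hbound := List.countP_le_length (l := t) (p := fun a => decide (score < a))
      rw [pvALoop]
      simp only [if_neg hle, ih (idx + 1) hp.2, List.countP_cons, List.length_cons]
      simp only [decide_eq_true_eq, if_pos hlt]
      have : min (t.countP (fun a => decide (score < a)) + 1 + 1) (t.length + 1)
           = min (t.countP (fun a => decide (score < a)) + 1) t.length + 1 := by omega
      rw [this]; push_cast; ring
  
-- on a (weakly) descending list the last element is the minimum
theorem pv_last_min : ∀ (l : List Int) (h : l ≠ []),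
    l.Pairwise (fun a b => b ≤ a) → ∀ x ∈ l, l.getLast h ≤ x := by
  intro l
  induction l with
  | nil => intro h; exact absurd rfl h
  | cons a t ih =>
    intro _ hp x hx
    rw [List.pairwise_cons] at hp
    by_cases ht : t = []
    · subst ht; simp at hx; simp [hx]
    · rw [List.getLast_cons ht]
      rw [List.mem_cons] at hx
      rcases hx with rfl | hx
      · exact le_trans (ih ht hp.2 _ (List.getLast_mem ht)) (hp.1 _ (List.getLast_mem ht))
      · exact ih ht hp.2 x hx

-- A's full per-score value on a nonempty weakly descending list is (#elements > score) + 1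
theorem pvAval_eq (score : Int) (l : List Int) (hne : l ≠ [])
    (hp : l.Pairwise (fun a b => b ≤ a)) :
    (if score < PySem.List.pyGetD l (-1) 0 then pvALoop score l 0 + 1 else pvALoop score l 0)
      = ((l.countP (fun a => decide (score < a)) : Nat) : Int) + 1 := by
  rw [PySem.List.pyGetD_neg_one (h := hne)]
  have hbound := List.countP_le_length (l := l) (p := fun a => decide (score < a))
  by_cases hk : l.countP (fun a => decide (score < a)) = l.length
  · -- every element > score, in particular the last one
    have hall : ∀ x ∈ l, score < x := by
      have := List.countP_eq_length.1 hk
      intro x hx; simpa using this x hx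
    have hlast : score < l.getLast hne := hall _ (List.getLast_mem hne)
    rw [if_pos hlast, pvALoop_eq score l 0 hp]
    have hlen : l.length ≠ 0 := by rw [Ne, List.length_eq_zero_iff]; exact hne
    rw [hk]
    have : min (l.length + 1) l.length = l.length := by omega
    simp [this]
  · -- some element ≤ score, hence the minimum (= last) ≤ score
    have hklt : l.countP (fun a => decide (score < a)) < l.length := lt_of_le_of_ne hbound hk
    have hex : ∃ x ∈ l, ¬ score < x := by
      by_contra hco
      push_neg at hco
      exact hk (List.countP_eq_length.2 (by intro x hx; simpa using hco x hx))
    obtain ⟨x, hxl, hxle⟩ := hex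
    have hlast : ¬ score < l.getLast hne := by
      have := pv_last_min l hne hp x hxl; omega
    rw [if_neg hlast, pvALoop_eq score l 0 hp]
    have : min (l.countP (fun a => decide (score < a)) + 1) l.length
         = l.countP (fun a => decide (score < a)) + 1 := by omega
    rw [this]; push_cast; ring

-- on a weakly ascending list, index < countP(≤ score) ↔ element ≤ score
theorem pv_asc_char : ∀ (l : List Int), l.Pairwise (fun a b => a ≤ b) →
    ∀ i < l.length, (l.getD i 0 ≤ score ↔ i < l.countP (fun a => decide (a ≤ score))) := by
  intro l
  induction l with
  | nil => intro _ i hi; simp at hi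
  | cons h t ih =>
    intro hp i hi
    rw [List.pairwise_cons] at hp
    by_cases hle : h ≤ score
    · have : (h :: t).countP (fun a => decide (a ≤ score)) = t.countP (fun a => decide (a ≤ score)) + 1 := by
        simp [List.countP_cons, hle]
      rw [this]
      cases i with
      | zero => simpa using hle
      | succ j =>
        simp only [List.getD_cons_succ]
        rw [ih hp.2 j (by simpa using hi)]
        omega
    · have hcz : t.countP (fun a => decide (a ≤ score)) = 0 := by
        rw [List.countP_eq_zero]
        intro a ha
        have := hp.1 a ha
        simp only [decide_eq_true_eq]; omega
      have : (h :: t).countP (fun a => decide (a ≤ score)) = 0 := by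
        simp [List.countP_cons, hle, hcz]
      rw [this]
      cases i with
      | zero => simpa using hle
      | succ j =>
        simp only [List.getD_cons_succ]
        constructor
        · intro hg
          exfalso
          have hjt : j < t.length := by simpa using hi
          have hmem : t.getD j 0 ∈ t := by
            rw [List.getD_eq_getElem t 0 hjt]; exact List.getElem_mem hjt
          have := hp.1 _ hmem; omega
        · omega

-- the binary search converges to countP(≤ score)
theorem pvBisect_eq (asc : List Int) (score : Int)
    (hp : asc.Pairwise (fun a b => a ≤ b)) :
    ∀ fuel lo hi, hi - lo ≤ fuel → hi ≤ asc.length →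
    lo ≤ asc.countP (fun a => decide (a ≤ score)) →
    asc.countP (fun a => decide (a ≤ score)) ≤ hi →
    pvBisect asc score lo hi = asc.countP (fun a => decide (a ≤ score)) := by
  intro fuel
  induction fuel with
  | zero =>
    intro lo hi hf hhi hlo hhi2
    have : ¬ lo < hi := by omega
    rw [pvBisect, dif_neg this]; omega
  | succ f ihf =>
    intro lo hi hf hhi hlo hhi2
    by_cases hlt : lo < hi
    · rw [pvBisect, dif_pos hlt]
      have hmidlt : (lo + hi) / 2 < asc.length := by omega
      have hchar := pv_asc_char (score := score) asc hp ((lo + hi) / 2) hmidlt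
      by_cases hm : asc.getD ((lo + hi) / 2) 0 ≤ score
      · simp only [if_pos hm]
        exact ihf _ _ (by omega) hhi (by have := hchar.1 hm; omega) hhi2
      · simp only [if_neg hm]
        refine ihf _ _ (by omega) (by omega) hlo ?_
        by_contra hco
        exact hm (hchar.2 (by omega))
    · rw [pvBisect, dif_neg hlt]; omega

-- ===== VERDICT (by name: the statement is the Claim_ definition above) =====
theorem climbingLeaderboard_LinearSearch_spec : Claim_equal_climbingLeaderboard_LinearSearch := by
  intro ranked player _hdom hpre
  unfold Spec_climbingLeaderboard_LinearSearch
  unfold climbingLeaderboard_LinearSearch climbingLeaderboard_LinearSearch_alt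
  rcases hpre with hne | hpe
  · simp only []
    rw [pv_foldl_app, pv_foldl_app]
    apply congrArg
    apply List.map_congr_left
    intro score _
    -- names
    set asc := PySem.List.sorted (PySem.Set.ofList ranked) (fun x => x) false with hasc
    have hascp : asc.Pairwise (fun a b => a ≤ b) := by
      have := PySem.List.sorted_pairwise (xs := PySem.Set.ofList ranked) (key := fun x => x)
      simpa using this
    have hasclt : asc.Pairwise (fun a b => a < b) := by
      have := PySem.List.sorted_ofList_pairwise_lt (xs := ranked)
      simpa using this
    have hperm : (PySem.List.sorted (PySem.Set.ofList ranked) (fun x => x) true) = asc.reverse := by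
      apply PySem.List.sorted_rev_eq_of_perm_of_pairwise_gt
      · exact (asc.reverse_perm).trans (PySem.List.sorted_perm _ _ _)
      · rw [List.pairwise_reverse]; exact hasclt
    rw [hperm]
    have hrne : asc.reverse ≠ [] := by
      simp only [ne_eq, List.reverse_eq_nil_iff]
      intro hnil
      rw [hasc] at hnil
      rw [PySem.List.sorted_eq_nil_iff] at hnil
      rcases List.exists_mem_of_ne_nil ranked hne with ⟨x, hx⟩
      have hxs : x ∈ PySem.Set.ofList ranked := (PySem.Set.mem_ofList _ _).2 hx
      rw [hnil] at hxs
      simp at hxs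
    have hrp : asc.reverse.Pairwise (fun a b => b ≤ a) := by
      rw [List.pairwise_reverse]; exact hascp
    rw [pvAval_eq score asc.reverse hrne hrp]
    have hC := pvBisect_eq asc score hascp asc.length 0 asc.length (by omega) le_rfl
      (Nat.zero_le _) List.countP_le_length
    rw [hC]
    -- count of (> score) on the reverse = length - count of (≤ score)
    have hsplit : asc.reverse.countP (fun a => decide (score < a))
        = asc.length - asc.countP (fun a => decide (a ≤ score)) := by
      rw [List.countP_reverse]
      have h2 : asc.countP (fun a => decide (a ≤ score)) = asc.countP (fun a => decide (¬ decide (score < a) = true)) := by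
        apply List.countP_congr
        intro a _
        by_cases h : score < a <;> simp [h] <;> omega
      have h1 : asc.countP (fun a => decide (score < a)) + asc.countP (fun a => decide (a ≤ score)) = asc.length := by
        rw [h2, ← List.length_eq_countP_add_countP (p := fun a => decide (score < a))]
      omega
    rw [hsplit]
    have := List.countP_le_length (l := asc) (p := fun a => decide (a ≤ score))
    push_cast [Nat.cast_sub this]
    ring
  · subst hpe; rfl
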